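-- pv_equiv track=rewrite | github.com/mgtezak/Advent_of_Code | 2023/Day_15.py | part1
-- ===== SOURCE A (Python) =====
-- def part1(puzzle_input):
--     total = 0
--     for step in puzzle_input.split(','):
--         current_val = 0
--         for char in step:
--             current_val += ord(char)
--             current_val *= 17
--             current_val %= 256
--         total += current_val
--
--     return total
-- ===== SOURCE B (Python) =====
-- def part1(puzzle_input):
--     total = 0
--     current_val = 0
--     for char in puzzle_input:
--         if char == ',':
--             total += current_val
--             current_val = 0
--         else:
--             current_val = ((current_val + ord(char)) * 17) % 256
--     return total + current_val
-- ===== Notes on version B (the rewrite author's own statement) =====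
-- stated objective: simpler
-- what changed: Replaced split(',') plus a nested per-piece loop by one flat pass over the characters that flushes the running HASH value into the total at each comma.
import Mathlib
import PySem

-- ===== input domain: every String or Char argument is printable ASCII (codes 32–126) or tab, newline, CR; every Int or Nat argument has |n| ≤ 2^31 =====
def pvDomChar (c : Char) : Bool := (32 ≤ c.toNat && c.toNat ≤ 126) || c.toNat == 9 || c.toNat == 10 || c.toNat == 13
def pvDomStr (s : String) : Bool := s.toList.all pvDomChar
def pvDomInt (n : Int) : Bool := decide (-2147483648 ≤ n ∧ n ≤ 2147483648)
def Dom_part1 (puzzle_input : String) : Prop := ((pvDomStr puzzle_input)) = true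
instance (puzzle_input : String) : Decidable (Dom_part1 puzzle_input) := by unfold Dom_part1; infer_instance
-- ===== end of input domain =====

-- B merges split(',') and the nested loop into one flat pass that flushes at each comma (simpler decomposition, same cost).

-- ===== PORT A =====
-- the inner loop body: current_val += ord(char); current_val *= 17; current_val %= 256
def pvStep (v : Int) (c : Char) : Int := PySem.Int.mod ((v + (c.toNat : Int)) * 17) 256

def part1 (puzzle_input : String) : Int :=
  (PySem.Chars.splitOn puzzle_input.toList [',']).foldl
    (fun total step => total + step.foldl pvStep 0) 0

-- ===== PORT B =====
def part1_alt (puzzle_input : String) : Int :=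
  let s := puzzle_input.toList.foldl
    (fun (st : Int × Int) c =>
      if c = ',' then (st.1 + st.2, 0) else (st.1, pvStep st.2 c))
    (0, 0)
  s.1 + s.2

-- ===== PRECONDITION & SPEC =====
def Spec_part1 (puzzle_input : String) (out : Int) : Prop := out = part1_alt puzzle_input
instance (puzzle_input : String) (out : Int) : Decidable (Spec_part1 puzzle_input out) := by unfold Spec_part1; infer_instance

-- ===== CLAIM (what is proved, stated in full; the proofs are below) =====
def Claim_equal_part1 : Prop := ∀ (puzzle_input : String), Dom_part1 puzzle_input → Spec_part1 puzzle_input (part1 puzzle_input)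

-- ===== LEMMAS AND PROOFS =====

-- hash of one piece
def pvHash (cs : List Char) : Int := cs.foldl pvStep 0

-- sum of hashes of a list of pieces
def pvSH (ps : List (List Char)) : Int := (ps.map pvHash).sum

-- B's result on remaining chars l starting from running value v
def pvT : List Char → Int → Int
  | [], v => v
  | c :: r, v => if c = ',' then v + pvT r 0 else pvT r (pvStep v c)

lemma pvHash_append_singleton (cs : List Char) (c : Char) :
    pvHash (cs ++ [c]) = pvStep (pvHash cs) c := by
  simp [pvHash]

lemma pvGo_sum : ∀ (fuel : Nat) (l cur : List Char) (acc : List (List Char)),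
    l.length < fuel →
    pvSH (PySem.Chars.splitOn.go [','] fuel l cur acc)
      = pvSH acc + pvT l (pvHash cur.reverse) := by
  intro fuel
  induction fuel with
  | zero => intro l cur acc h; omega
  | succ n ih =>
    intro l cur acc h
    cases l with
    | nil =>
      simp [PySem.Chars.splitOn.go, pvSH, pvT]
    | cons c rest =>
      by_cases hc : c = ','
      · subst hc
        have : List.isPrefixOf [','] (',' :: rest) = true := by
          simp [List.isPrefixOf]
        rw [PySem.Chars.splitOn.go]
        simp only [this, if_pos]
        rw [show List.drop [','].length (',' :: rest) = rest from rfl,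
            ih rest [] (cur.reverse :: acc) (by simpa using Nat.lt_of_succ_lt_succ h)]
        simp [pvSH, pvT, pvHash]
        ring
      · have hpre : List.isPrefixOf [','] (c :: rest) = false := by
          simp [List.isPrefixOf]
          exact fun hcc => hc hcc.symm
        rw [PySem.Chars.splitOn.go]
        simp only [hpre]
        rw [if_neg (by simp)]
        rw [ih rest (c :: cur) acc (by simpa using Nat.lt_of_succ_lt_succ h)]
        simp [pvT, hc, pvHash_append_singleton]

-- A's outer foldl is the sum of hashes
lemma pvFoldl_add_hash (ps : List (List Char)) (t : Int) :
    ps.foldl (fun total step => total + step.foldl pvStep 0) t = t + pvSH ps := by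
  induction ps generalizing t with
  | nil => simp [pvSH]
  | cons p rest ih => simp [List.foldl, ih, pvSH, pvHash]; ring

-- B's paired fold computes pvT
lemma pvFoldl_pair (l : List Char) : ∀ (t v : Int),
    (l.foldl (fun (st : Int × Int) c =>
        if c = ',' then (st.1 + st.2, 0) else (st.1, pvStep st.2 c)) (t, v)).1
    + (l.foldl (fun (st : Int × Int) c =>
        if c = ',' then (st.1 + st.2, 0) else (st.1, pvStep st.2 c)) (t, v)).2
    = t + pvT l v := by
  induction l with
  | nil => intro t v; simp [pvT]
  | cons c rest ih =>
    intro t v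
    by_cases hc : c = ','
    · simp [List.foldl, hc, pvT, ih]; ring
    · simp [List.foldl, hc, pvT, ih]

-- ===== VERDICT (by name: the statement is the Claim_ definition above) =====
theorem part1_spec : Claim_equal_part1 := by
  intro s _
  unfold Spec_part1 part1 part1_alt PySem.Chars.splitOn
  rw [pvFoldl_add_hash, pvGo_sum (s.toList.length + 1) s.toList [] [] (by omega)]
  simp [pvSH, pvHash, pvFoldl_pair]
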